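-- pv_equiv track=rewrite | github.com/Doc-designs/School-Work | Semester 1/exam.py | greatestWeight
-- ===== SOURCE A (Python) =====
-- def greatestWeight(L):
--     '''
--     Assumes L is a nonempty list of pairs (item, weight).
--     An item may occur in more than one tuple, in which case
--     its total weight is the sum of the weights in its tuples.
--     Return the item with the greatest cumulative weight.
--     (In the case of a tie, return any item of greatest cumulative weight).
--
--     CONSTRAINT: YOU MUST USE A DICTIONARY.
--
--     For example,
--     greatestWeight([('item1', 3)]) returns 'item1'
--     greatestWeight([('item1', 3),('item2', 2)]) returns 'item1'
--     greatestWeight([('item2', 2),('item1', 3),('item2', 2)]) returns 'item2'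
--     '''
--     weightDict = {"item1": 0, "item2": 0}
--     for i in range(len(L)):
--         if L[i][0] == 'item1':
--             weightDict["item1"] += L[i][1]
--         else:
--             weightDict["item2"] += L[i][1]
--     if weightDict["item1"] > weightDict["item2"]:
--         return "item1"
--     else:
--         return "item2"
-- ===== SOURCE B (Python) =====
-- def greatestWeight(L):
--     total = sum(w for _, w in L)
--     w1 = sum(w for k, w in L if k == 'item1')
--     return 'item1' if 2 * w1 > total else 'item2'
-- ===== Notes on version B (the rewrite author's own statement) =====
-- stated objective: simpler
-- what changed: Replaces the single dict-accumulating index loop with two staged sum() passes (grand total and item1-filtered total) and an arithmetic reformulation of the comparison: 2*w1 > total instead of comparing two dictionary buckets.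
import Mathlib
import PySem

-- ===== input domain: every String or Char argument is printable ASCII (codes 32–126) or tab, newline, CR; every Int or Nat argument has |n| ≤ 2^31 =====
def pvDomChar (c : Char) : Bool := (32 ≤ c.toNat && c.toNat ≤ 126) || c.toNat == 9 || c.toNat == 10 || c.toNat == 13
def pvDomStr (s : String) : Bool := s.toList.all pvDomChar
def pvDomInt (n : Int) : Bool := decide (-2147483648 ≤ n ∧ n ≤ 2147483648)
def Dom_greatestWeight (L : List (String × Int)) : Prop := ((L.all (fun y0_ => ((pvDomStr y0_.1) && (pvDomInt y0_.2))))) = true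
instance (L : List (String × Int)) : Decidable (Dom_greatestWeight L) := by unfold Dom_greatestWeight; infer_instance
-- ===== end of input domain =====

-- B replaces A's single dict-accumulating loop with two staged sums (grand total and the item1-filtered total) and the reformulated test 2*w1 > total (simpler decomposition, same O(n) cost).


-- ===== PORT A =====
def greatestWeight (L : List (String × Int)) : String :=
  let weightDict : PySem.Dict String Int := PySem.Dict.ofList [("item1", 0), ("item2", 0)]
  let weightDict :=
    (PySem.List.pyRange 0 (PySem.List.len L) 1).foldl
      (fun d i =>
        let p := PySem.List.pyGetD L i ("", 0)   -- L[i]; index always in range here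
        if p.1 == "item1" then d.modify "item1" 0 (· + p.2)
        else d.modify "item2" 0 (· + p.2)) weightDict
  if weightDict.getD "item1" 0 > weightDict.getD "item2" 0 then "item1" else "item2"

-- ===== PORT B =====
def greatestWeight_alt (L : List (String × Int)) : String :=
  let total : Int := L.foldl (fun s p => s + p.2) 0
  let w1 := (L.filter (fun p => p.1 == "item1")).foldl (fun s p => s + p.2) 0
  if 2 * w1 > total then "item1" else "item2"

-- ===== PRECONDITION & SPEC =====
def Spec_greatestWeight (L : List (String × Int)) (out : String) : Prop := out = greatestWeight_alt L
instance (L : List (String × Int)) (out : String) : Decidable (Spec_greatestWeight L out) := by unfold Spec_greatestWeight; infer_instance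

-- ===== CLAIM (what is proved, stated in full; the proofs are below) =====
def Claim_equal_greatestWeight : Prop := ∀ (L : List (String × Int)), Dom_greatestWeight L → Spec_greatestWeight L (greatestWeight L)

-- ===== LEMMAS AND PROOFS =====

-- Shifting the start accumulator out of a sum fold.
theorem pv_foldl_shift (L : List (String × Int)) (c : Int) :
    L.foldl (fun s p => s + p.2) c = c + L.foldl (fun s p => s + p.2) 0 := by
  induction L generalizing c with
  | nil => simp
  | cons p t ih =>
    simp only [List.foldl_cons]
    rw [ih (c + p.2), ih (0 + p.2)]
    omega

-- Invariant of A's loop: the two dict buckets hold the item1-filtered sum and the rest of the total.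
theorem pv_loop_invariant (L : List (String × Int)) (d : PySem.Dict String Int) :
    (L.foldl (fun d p =>
        if p.1 == "item1" then d.modify "item1" 0 (· + p.2)
        else d.modify "item2" 0 (· + p.2)) d).getD "item1" 0
      = d.getD "item1" 0 + (L.filter (fun p => p.1 == "item1")).foldl (fun s p => s + p.2) 0
    ∧ (L.foldl (fun d p =>
        if p.1 == "item1" then d.modify "item1" 0 (· + p.2)
        else d.modify "item2" 0 (· + p.2)) d).getD "item2" 0
      = d.getD "item2" 0 +
        (L.foldl (fun s p => s + p.2) 0
          - (L.filter (fun p => p.1 == "item1")).foldl (fun s p => s + p.2) 0) := by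
  induction L generalizing d with
  | nil => simp
  | cons p t ih =>
    rcases hb : (p.1 == "item1") with _ | _
    · obtain ⟨h1, h2⟩ := ih (d.modify "item2" 0 (· + p.2))
      simp only [List.foldl_cons, List.filter_cons, hb, Bool.false_eq_true, if_false]
      refine ⟨?_, ?_⟩
      · rw [h1]; simp [PySem.Dict.getD_modify_of_ne]
      · rw [h2, pv_foldl_shift t (0 + p.2)]
        simp [PySem.Dict.getD_modify_self]
        omega
    · obtain ⟨h1, h2⟩ := ih (d.modify "item1" 0 (· + p.2))
      simp only [List.foldl_cons, List.filter_cons, hb, if_true]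
      refine ⟨?_, ?_⟩
      · rw [h1, pv_foldl_shift (t.filter (fun p => p.1 == "item1")) (0 + p.2)]
        simp [PySem.Dict.getD_modify_self]
        omega
      · rw [h2, pv_foldl_shift t (0 + p.2),
            pv_foldl_shift (t.filter (fun p => p.1 == "item1")) (0 + p.2)]
        simp [PySem.Dict.getD_modify_of_ne]

-- ===== VERDICT (by name: the statement is the Claim_ definition above) =====
theorem greatestWeight_spec : Claim_equal_greatestWeight := by
  intro L _
  unfold Spec_greatestWeight greatestWeight greatestWeight_alt
  dsimp only
  rw [show List.foldl
        (fun d i =>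
          let p := PySem.List.pyGetD L i ("", 0)
          if p.1 == "item1" then d.modify "item1" 0 (· + p.2)
          else d.modify "item2" 0 (· + p.2))
        (PySem.Dict.ofList [("item1", 0), ("item2", 0)]) (PySem.List.pyRange 0 (PySem.List.len L))
      = List.foldl
        (fun d p =>
          if p.1 == "item1" then d.modify "item1" 0 (· + p.2)
          else d.modify "item2" 0 (· + p.2))
        (PySem.Dict.ofList [("item1", 0), ("item2", 0)]) L
    from PySem.List.foldl_pyRange_zero_pyGetD L ("", 0)
        (fun d p =>
          if p.1 == "item1" then d.modify "item1" 0 (· + p.2)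
          else d.modify "item2" 0 (· + p.2))
        (PySem.Dict.ofList [("item1", 0), ("item2", 0)])]
  obtain ⟨h1, h2⟩ := pv_loop_invariant L (PySem.Dict.ofList [("item1", 0), ("item2", 0)])
  rw [h1, h2,
      show (PySem.Dict.ofList [("item1", (0 : Int)), ("item2", 0)]).getD "item1" 0 = 0 from by decide,
      show (PySem.Dict.ofList [("item1", (0 : Int)), ("item2", 0)]).getD "item2" 0 = 0 from by decide]
  split_ifs <;> first | rfl | omega
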